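-- pv_equiv track=rewrite | github.com/hel31006/ZoetisProject | app.py | clean_clinic_name
-- ===== SOURCE A (Python) =====
-- def clean_clinic_name(name):
--     prefixes = ['out of', 'at', 'from', 'to', 'of', 'in', 'inside', 'near', 'beside']
--     name = name.strip().lower()
--     for prefix in prefixes:
--         if name.startswith(prefix + " "):
--             name = name[len(prefix) + 1:]
--             break
--     return name.strip().title()
-- ===== SOURCE B (Python) =====
-- def clean_clinic_name(name):
--     # Title-case first, then strip the (already title-cased) preposition prefix:
--     # no lowercasing pass, no per-prefix loop, no second title pass.
--     t = name.strip().title()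
--     if t.startswith('Out Of '):
--         return t[7:].lstrip()
--     head, sep, tail = t.partition(' ')
--     if sep and head in ('At', 'From', 'To', 'Of', 'In', 'Inside', 'Near', 'Beside'):
--         return tail.lstrip()
--     return t
-- ===== Notes on version B (the rewrite author's own statement) =====
-- stated objective: alternative
-- what changed: B reverses the pass order: it title-cases the stripped name once up front and removes the already-title-cased preposition prefix with a single partition at the first space, so A's lowercasing pass, its per-prefix startswith loop and its second strip+title pass all disappear.
import Mathlib
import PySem

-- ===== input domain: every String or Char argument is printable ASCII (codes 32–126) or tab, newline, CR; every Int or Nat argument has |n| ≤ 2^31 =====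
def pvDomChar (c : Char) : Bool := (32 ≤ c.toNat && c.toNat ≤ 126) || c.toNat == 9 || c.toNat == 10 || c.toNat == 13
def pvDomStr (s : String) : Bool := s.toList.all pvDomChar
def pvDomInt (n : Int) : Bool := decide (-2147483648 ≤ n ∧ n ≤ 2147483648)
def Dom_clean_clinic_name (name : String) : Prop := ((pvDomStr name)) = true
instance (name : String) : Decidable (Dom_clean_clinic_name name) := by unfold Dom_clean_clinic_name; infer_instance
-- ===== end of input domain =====

-- B reverses A's pass order: it title-cases the stripped name ONCE up front and removes
-- the already-title-cased preposition via one partition at the first space, with no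
-- lowercasing pass, no per-prefix startswith loop and no second strip+title pass.
-- Return-value equivalence only (neither program mutates anything).

-- hand port of str.title(), exact on the ASCII domain: a letter starts a word iff the
-- previous character is not a letter (ASCII cased = alpha); shared by both ports.
def pvTitle (prev : Bool) : List Char → List Char
  | [] => []
  | c :: cs =>
    if PySem.Chars.isalpha c then
      (if prev then PySem.Chars.lowerChar c else PySem.Chars.upperChar c) :: pvTitle true cs
    else c :: pvTitle false cs

-- ===== PORT A =====
-- A's loop over the prefix list: first prefix with name.startswith(prefix + " ") wins.
def pvTryPrefixes : List (List Char) → List Char → List Char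
  | [], s => s
  | p :: ps, s =>
    if PySem.Chars.startswith s (p ++ [' ']) then
      PySem.List.slice s (some ((p.length : Int) + 1)) none
    else pvTryPrefixes ps s

def pvPrefixesA : List (List Char) :=
  ["out of".toList, "at".toList, "from".toList, "to".toList, "of".toList,
   "in".toList, "inside".toList, "near".toList, "beside".toList]

def clean_clinic_name (name : String) : String :=
  let s := PySem.Chars.lower (PySem.Chars.strip name.toList)
  String.ofList (pvTitle false (PySem.Chars.strip (pvTryPrefixes pvPrefixesA s)))

-- ===== PORT B =====
def pvTitleWords : List (List Char) :=
  ["At".toList, "From".toList, "To".toList, "Of".toList,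
   "In".toList, "Inside".toList, "Near".toList, "Beside".toList]

-- t.partition(' ') is hand-ported, exactly, as one find plus the two slices
-- (head = t[:i], sep nonempty iff i ≠ -1, tail = t[i+1:]).
def clean_clinic_name_alt (name : String) : String :=
  let t := pvTitle false (PySem.Chars.strip name.toList)
  if PySem.Chars.startswith t "Out Of ".toList then
    String.ofList (PySem.Chars.lstrip (PySem.List.slice t (some 7) none))
  else
    let i := PySem.Chars.find t [' ']
    let head := if i = -1 then t else PySem.List.slice t none (some i)
    let tail := if i = -1 then [] else PySem.List.slice t (some (i + 1)) none
    if i ≠ -1 ∧ head ∈ pvTitleWords then String.ofList (PySem.Chars.lstrip tail)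
    else String.ofList t

-- ===== PRECONDITION & SPEC =====
def Spec_clean_clinic_name (name : String) (out : String) : Prop := out = clean_clinic_name_alt name
instance (name : String) (out : String) : Decidable (Spec_clean_clinic_name name out) := by unfold Spec_clean_clinic_name; infer_instance

-- ===== CLAIM (what is proved, stated in full; the proofs are below) =====
def Claim_equal_clean_clinic_name : Prop := ∀ (name : String), Dom_clean_clinic_name name → Spec_clean_clinic_name name (clean_clinic_name name)

-- ===== LEMMAS AND PROOFS =====

-- ---- character-level facts (universal, by toNat arithmetic) ----

lemma pvToNat_ofNat (n : Nat) (h : n < 55296) : (Char.ofNat n).toNat = n := by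
  unfold Char.ofNat
  rw [dif_pos (Or.inl h)]
  rfl

lemma pvCharExt (c d : Char) (h : c.toNat = d.toNat) : c = d :=
  Char.ext (UInt32.toNat_inj.mp h)

lemma isupper_iff (c : Char) : PySem.Chars.isupper c = true ↔ 65 ≤ c.toNat ∧ c.toNat ≤ 90 := by
  simp only [PySem.Chars.isupper, Bool.and_eq_true, decide_eq_true_iff]
  exact Iff.rfl

lemma islower_iff (c : Char) : PySem.Chars.islower c = true ↔ 97 ≤ c.toNat ∧ c.toNat ≤ 122 := by
  simp only [PySem.Chars.islower, Bool.and_eq_true, decide_eq_true_iff]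
  exact Iff.rfl

lemma isalpha_iff (c : Char) : PySem.Chars.isalpha c = true ↔
    (65 ≤ c.toNat ∧ c.toNat ≤ 90) ∨ (97 ≤ c.toNat ∧ c.toNat ≤ 122) := by
  simp only [PySem.Chars.isalpha, Bool.or_eq_true, isupper_iff, islower_iff]

lemma toNat_lowerChar (c : Char) :
    (PySem.Chars.lowerChar c).toNat = if 65 ≤ c.toNat ∧ c.toNat ≤ 90 then c.toNat + 32 else c.toNat := by
  unfold PySem.Chars.lowerChar
  by_cases h : PySem.Chars.isupper c = true
  · have hn := (isupper_iff c).mp h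
    rw [if_pos h, if_pos hn, pvToNat_ofNat _ (by omega)]
  · rw [if_neg h, if_neg (fun hn => h ((isupper_iff c).mpr hn))]

lemma toNat_upperChar (c : Char) :
    (PySem.Chars.upperChar c).toNat = if 97 ≤ c.toNat ∧ c.toNat ≤ 122 then c.toNat - 32 else c.toNat := by
  unfold PySem.Chars.upperChar
  by_cases h : PySem.Chars.islower c = true
  · have hn := (islower_iff c).mp h
    rw [if_pos h, if_pos hn, pvToNat_ofNat _ (by omega)]
  · rw [if_neg h, if_neg (fun hn => h ((islower_iff c).mpr hn))]

lemma lowerChar_lowerChar (c : Char) :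
    PySem.Chars.lowerChar (PySem.Chars.lowerChar c) = PySem.Chars.lowerChar c := by
  apply pvCharExt
  rw [toNat_lowerChar, toNat_lowerChar c]
  split_ifs with h1 h2 <;> omega

lemma upperChar_lowerChar (c : Char) :
    PySem.Chars.upperChar (PySem.Chars.lowerChar c) = PySem.Chars.upperChar c := by
  apply pvCharExt
  rw [toNat_upperChar, toNat_lowerChar, toNat_upperChar]
  split_ifs with h1 h2 h3 <;> omega

lemma lowerChar_upperChar (c : Char) :
    PySem.Chars.lowerChar (PySem.Chars.upperChar c) = PySem.Chars.lowerChar c := by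
  apply pvCharExt
  rw [toNat_lowerChar, toNat_upperChar, toNat_lowerChar]
  split_ifs with h1 h2 h3 <;> omega

lemma lowerChar_of_not_alpha (c : Char) (h : ¬ PySem.Chars.isalpha c = true) :
    PySem.Chars.lowerChar c = c := by
  unfold PySem.Chars.lowerChar
  rw [if_neg]
  intro hu
  exact h (by unfold PySem.Chars.isalpha; rw [hu]; rfl)

lemma isalpha_lowerChar (c : Char) :
    PySem.Chars.isalpha (PySem.Chars.lowerChar c) = PySem.Chars.isalpha c := by
  rw [Bool.eq_iff_iff, isalpha_iff, isalpha_iff, toNat_lowerChar]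
  split_ifs with h <;> omega

lemma isspace_iff (c : Char) : PySem.Chars.isspace c = true ↔
    c.toNat = 32 ∨ (9 ≤ c.toNat ∧ c.toNat ≤ 13) ∨ (28 ≤ c.toNat ∧ c.toNat ≤ 31) ∨ c.toNat = 133 ∨
    c.toNat = 160 ∨ c.toNat = 5760 ∨ (8192 ≤ c.toNat ∧ c.toNat ≤ 8202) ∨ c.toNat = 8232 ∨
    c.toNat = 8233 ∨ c.toNat = 8239 ∨ c.toNat = 8287 ∨ c.toNat = 12288 := by
  simp only [PySem.Chars.isspace, Bool.or_eq_true, Bool.and_eq_true, decide_eq_true_iff]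
  tauto

lemma isspace_lowerChar (c : Char) :
    PySem.Chars.isspace (PySem.Chars.lowerChar c) = PySem.Chars.isspace c := by
  rw [Bool.eq_iff_iff, isspace_iff, isspace_iff, toNat_lowerChar]
  split_ifs with h <;> omega

lemma isspace_upperChar (c : Char) :
    PySem.Chars.isspace (PySem.Chars.upperChar c) = PySem.Chars.isspace c := by
  rw [Bool.eq_iff_iff, isspace_iff, isspace_iff, toNat_upperChar]
  split_ifs with h <;> omega

lemma not_alpha_of_space (c : Char) (h : PySem.Chars.isspace c = true) :
    PySem.Chars.isalpha c = false := by
  rw [← Bool.not_eq_true]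
  intro ha
  rw [isspace_iff] at h
  rw [isalpha_iff] at ha
  omega

lemma lowerChar_eq_space_iff (c : Char) : PySem.Chars.lowerChar c = ' ' ↔ c = ' ' := by
  constructor
  · intro h
    apply pvCharExt
    have h2 := congrArg Char.toNat h
    rw [toNat_lowerChar] at h2
    have hs : (' ' : Char).toNat = 32 := rfl
    rw [hs] at h2 ⊢
    split_ifs at h2 <;> omega
  · intro h
    rw [h]
    rfl

-- ---- pvTitle structure lemmas ----

lemma pvTitle_cons (p : Bool) (c : Char) (cs : List Char) :
    pvTitle p (c :: cs) = (if PySem.Chars.isalpha c then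
      (if p then PySem.Chars.lowerChar c else PySem.Chars.upperChar c) :: pvTitle true cs
    else c :: pvTitle false cs) := rfl

lemma length_pvTitle (p : Bool) (l : List Char) : (pvTitle p l).length = l.length := by
  induction l generalizing p with
  | nil => rfl
  | cons c cs ih =>
    rw [pvTitle_cons]
    split_ifs <;> simp [ih]

lemma pvTitle_append (p : Bool) (a b : List Char) :
    pvTitle p (a ++ b) = pvTitle p a ++ pvTitle (a.foldl (fun _ c => PySem.Chars.isalpha c) p) b := by
  induction a generalizing p with
  | nil => rfl
  | cons c cs ih =>
    simp only [List.cons_append, pvTitle_cons, List.foldl_cons]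
    split_ifs with h <;> simp [ih, h]

lemma pvTitle_lower (p : Bool) (l : List Char) :
    pvTitle p (l.map PySem.Chars.lowerChar) = pvTitle p l := by
  induction l generalizing p with
  | nil => rfl
  | cons c cs ih =>
    simp only [List.map_cons, pvTitle_cons, isalpha_lowerChar]
    by_cases h : PySem.Chars.isalpha c = true
    · simp [h, ih, lowerChar_lowerChar, upperChar_lowerChar]
    · simp [h, ih, lowerChar_of_not_alpha c h]

lemma lower_pvTitle (p : Bool) (l : List Char) :
    (pvTitle p l).map PySem.Chars.lowerChar = l.map PySem.Chars.lowerChar := by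
  induction l generalizing p with
  | nil => rfl
  | cons c cs ih =>
    rw [pvTitle_cons]
    split_ifs with h hp <;>
      simp [ih, lowerChar_lowerChar, lowerChar_upperChar]

lemma pvTitle_lstrip (l : List Char) :
    pvTitle false (PySem.Chars.lstrip l) = PySem.Chars.lstrip (pvTitle false l) := by
  induction l with
  | nil => rfl
  | cons c cs ih =>
    simp only [PySem.Chars.lstrip] at ih ⊢
    by_cases hs : PySem.Chars.isspace c = true
    · rw [List.dropWhile_cons_of_pos hs, ih, pvTitle_cons,
        if_neg (by simp [not_alpha_of_space c hs]), List.dropWhile_cons_of_pos hs]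
    · rw [List.dropWhile_cons_of_neg (by simp [hs])]
      by_cases h : PySem.Chars.isalpha c = true
      · rw [pvTitle_cons, if_pos h]
        simp only [Bool.false_eq_true, if_false]
        rw [List.dropWhile_cons_of_neg (by simp [isspace_upperChar, hs])]
      · rw [pvTitle_cons, if_neg h, List.dropWhile_cons_of_neg (by simp [hs])]

-- ---- find of the first space is invariant under lowercasing ----

lemma singleton_prefix_iff (c : Char) (t : List Char) : [c] <+: t ↔ ∃ u, t = c :: u := by
  constructor
  · rintro ⟨u, rfl⟩; exact ⟨u, rfl⟩
  · rintro ⟨u, rfl⟩; exact ⟨u, rfl⟩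

lemma space_prefix_drop_lower (x : List Char) (j : Nat) :
    [' '] <+: (x.map PySem.Chars.lowerChar).drop j ↔ [' '] <+: x.drop j := by
  rw [← List.map_drop, singleton_prefix_iff, singleton_prefix_iff]
  constructor
  · rintro ⟨u, hu⟩
    cases hd : x.drop j with
    | nil => rw [hd] at hu; simp at hu
    | cons d ds =>
      rw [hd] at hu
      simp only [List.map_cons, List.cons.injEq] at hu
      exact ⟨ds, by rw [(lowerChar_eq_space_iff d).mp hu.1]⟩
  · rintro ⟨u, hu⟩
    exact ⟨u.map PySem.Chars.lowerChar, by rw [hu]; rfl⟩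

lemma find_space_lower (x : List Char) :
    PySem.Chars.find (x.map PySem.Chars.lowerChar) [' '] = PySem.Chars.find x [' '] := by
  by_cases h : PySem.Chars.find x [' '] = -1
  · rw [h, PySem.Chars.find_eq_neg_one_iff]
    rw [PySem.Chars.find_eq_neg_one_iff] at h
    intro hin
    apply h
    rw [← PySem.Chars.isIn_iff_infix, ← PySem.Chars.exists_prefix_drop_iff_isIn] at hin ⊢
    obtain ⟨j, hj⟩ := hin
    exact ⟨j, (space_prefix_drop_lower x j).mp hj⟩
  · have hge : (0 : Int) ≤ PySem.Chars.find x [' '] := by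
      have := PySem.Chars.neg_one_le_find x [' ']
      omega
    obtain ⟨hpre, hmin⟩ := PySem.Chars.find_spec (s := x) (sub := [' ']) hge
    have h2 : PySem.Chars.find (x.map PySem.Chars.lowerChar) [' '] ≠ -1 := by
      rw [PySem.Chars.find_ne_neg_one_iff, ← PySem.Chars.isIn_iff_infix,
        ← PySem.Chars.exists_prefix_drop_iff_isIn]
      exact ⟨(PySem.Chars.find x [' ']).toNat, (space_prefix_drop_lower x _).mpr hpre⟩
    have hge2 : (0 : Int) ≤ PySem.Chars.find (x.map PySem.Chars.lowerChar) [' '] := by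
      have := PySem.Chars.neg_one_le_find (x.map PySem.Chars.lowerChar) [' ']
      omega
    obtain ⟨hpre2, hmin2⟩ := PySem.Chars.find_spec (s := x.map PySem.Chars.lowerChar) (sub := [' ']) hge2
    have ha : ¬ (PySem.Chars.find (x.map PySem.Chars.lowerChar) [' ']).toNat < (PySem.Chars.find x [' ']).toNat := by
      intro hlt
      exact hmin _ hlt ((space_prefix_drop_lower x _).mp hpre2)
    have hb : ¬ (PySem.Chars.find x [' ']).toNat < (PySem.Chars.find (x.map PySem.Chars.lowerChar) [' ']).toNat := by
      intro hlt
      exact hmin2 _ hlt ((space_prefix_drop_lower x _).mpr hpre)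
    omega

-- ---- strip structure lemmas ----

lemma dropWhile_eq_self_head? {α : Type} (p : α → Bool) (l : List α) :
    List.dropWhile p l = l ↔ ∀ a ∈ l.head?, ¬ p a = true := by
  cases l with
  | nil => simp
  | cons c cs =>
    by_cases hp : p c = true
    · rw [List.dropWhile_cons_of_pos hp]
      constructor
      · intro h
        exfalso
        have hlen := congrArg List.length h
        have hle := List.length_dropWhile_le p cs
        simp only [List.length_cons] at hlen
        omega
      · intro h
        exact absurd hp (h c (by simp))
    · rw [List.dropWhile_cons_of_neg hp]
      simp [hp]

lemma dropWhile_idem {α : Type} (p : α → Bool) (l : List α) :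
    List.dropWhile p (List.dropWhile p l) = List.dropWhile p l := by
  rw [dropWhile_eq_self_head?]
  intro a ha hp
  have hne : List.dropWhile p l ≠ [] := by
    intro he
    rw [he] at ha
    simp at ha
  have hh := List.head_dropWhile_not p hne
  rw [List.head?_eq_some_head hne] at ha
  simp only [Option.mem_def, Option.some.injEq] at ha
  rw [← ha] at hp
  rw [hh] at hp
  exact Bool.false_ne_true hp

lemma rstrip_eq_self_iff (z : List Char) :
    PySem.Chars.rstrip z = z ↔ ∀ a ∈ z.getLast?, ¬ PySem.Chars.isspace a = true := by
  have hiff : PySem.Chars.rstrip z = z ↔ List.dropWhile PySem.Chars.isspace z.reverse = z.reverse := by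
    unfold PySem.Chars.rstrip
    constructor
    · intro h
      conv_rhs => rw [← h]
      rw [List.reverse_reverse]
    · intro h
      rw [h, List.reverse_reverse]
  rw [hiff, dropWhile_eq_self_head?, List.head?_reverse]

lemma lstrip_eq_self_iff (z : List Char) :
    PySem.Chars.lstrip z = z ↔ ∀ a ∈ z.head?, ¬ PySem.Chars.isspace a = true := by
  unfold PySem.Chars.lstrip
  exact dropWhile_eq_self_head? _ _

lemma rstrip_drop (x : List Char) (h : PySem.Chars.rstrip x = x) (k : Nat) :
    PySem.Chars.rstrip (x.drop k) = x.drop k := by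
  rw [rstrip_eq_self_iff] at h ⊢
  intro a ha
  rw [List.getLast?_drop] at ha
  split_ifs at ha with h1
  · simp at ha
  · exact h a ha

lemma lstrip_lstrip (x : List Char) : PySem.Chars.lstrip (PySem.Chars.lstrip x) = PySem.Chars.lstrip x :=
  dropWhile_idem _ _

lemma rstrip_rstrip (x : List Char) : PySem.Chars.rstrip (PySem.Chars.rstrip x) = PySem.Chars.rstrip x := by
  unfold PySem.Chars.rstrip
  rw [List.reverse_reverse, dropWhile_idem]

lemma rstrip_prefix (y : List Char) : PySem.Chars.rstrip y <+: y := by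
  have h := List.dropWhile_suffix (l := y.reverse) (p := PySem.Chars.isspace)
  unfold PySem.Chars.rstrip
  rw [← List.reverse_suffix]
  rw [List.reverse_reverse]
  exact h

lemma lstrip_rstrip (y : List Char) (h : PySem.Chars.lstrip y = y) :
    PySem.Chars.lstrip (PySem.Chars.rstrip y) = PySem.Chars.rstrip y := by
  rw [lstrip_eq_self_iff] at h ⊢
  intro a ha
  obtain ⟨t, ht⟩ := rstrip_prefix y
  cases hz : PySem.Chars.rstrip y with
  | nil => rw [hz] at ha; simp at ha
  | cons d ds =>
    rw [hz] at ha ht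
    simp only [List.head?_cons, Option.mem_def, Option.some.injEq] at ha
    apply h a
    rw [← ht, ← ha]
    simp

lemma strip_strip (x : List Char) : PySem.Chars.strip (PySem.Chars.strip x) = PySem.Chars.strip x := by
  unfold PySem.Chars.strip
  rw [lstrip_rstrip _ (lstrip_lstrip x), rstrip_rstrip]

lemma strip_parts (x : List Char) (h : PySem.Chars.strip x = x) :
    PySem.Chars.lstrip x = x ∧ PySem.Chars.rstrip x = x := by
  constructor
  · conv_lhs => rw [← h]
    conv_rhs => rw [← h]
    unfold PySem.Chars.strip
    rw [lstrip_rstrip _ (lstrip_lstrip x)]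
  · conv_lhs => rw [← h]
    conv_rhs => rw [← h]
    unfold PySem.Chars.strip
    rw [rstrip_rstrip]

lemma lstrip_suffix (x : List Char) : PySem.Chars.lstrip x <:+ x := List.dropWhile_suffix _

lemma strip_drop (s : List Char) (h : PySem.Chars.rstrip s = s) (k : Nat) :
    PySem.Chars.strip (s.drop k) = PySem.Chars.lstrip (s.drop k) := by
  unfold PySem.Chars.strip
  obtain ⟨pre, hpre⟩ := lstrip_suffix (s.drop k)
  have hj : PySem.Chars.lstrip (s.drop k) = (s.drop k).drop pre.length := by
    conv_rhs => rw [← hpre]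
    rw [List.drop_left]
  rw [hj, List.drop_drop]
  exact rstrip_drop s h _

lemma stripped_lower (x : List Char) :
    PySem.Chars.strip (x.map PySem.Chars.lowerChar) = (PySem.Chars.strip x).map PySem.Chars.lowerChar := by
  have hfun : (PySem.Chars.isspace ∘ PySem.Chars.lowerChar) = PySem.Chars.isspace := by
    funext c
    simp [Function.comp, isspace_lowerChar]
  unfold PySem.Chars.strip PySem.Chars.rstrip PySem.Chars.lstrip
  simp only [List.dropWhile_map, ← List.map_reverse, List.dropWhile_map, hfun]

-- ---- A's prefix scan characterised (the old-B shape over the lowercase string) ----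

def pvWordsB : List (List Char) :=
  ["at".toList, "from".toList, "to".toList, "of".toList,
   "in".toList, "inside".toList, "near".toList, "beside".toList]

lemma startswith_word_space (w s : List Char) (hw : ' ' ∉ w) :
    PySem.Chars.startswith s (w ++ [' ']) = true ↔
      PySem.Chars.find s [' '] = (w.length : Int) ∧ s.take w.length = w := by
  constructor
  · intro h
    rw [PySem.Chars.startswith_iff] at h
    obtain ⟨r, hr⟩ := h
    have hs : s = w ++ ' ' :: r := by simpa using hr.symm
    have htake : s.take w.length = w := by
      simp [hs]
    have hinf : [' '] <:+: s := ⟨w, r, by simpa using hs.symm⟩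
    have hne : PySem.Chars.find s [' '] ≠ -1 :=
      (PySem.Chars.find_ne_neg_one_iff s [' ']).mpr hinf
    have hge : (0 : Int) ≤ PySem.Chars.find s [' '] := by
      have := PySem.Chars.neg_one_le_find s [' ']
      omega
    obtain ⟨hpre, hmin⟩ := PySem.Chars.find_spec (s := s) (sub := [' ']) hge
    have hdropw : [' '] <+: s.drop w.length := by
      rw [hs, List.drop_left' rfl]
      exact ⟨r, rfl⟩
    have hle : (PySem.Chars.find s [' ']).toNat ≤ w.length := by
      by_contra hlt
      exact hmin w.length (by omega) hdropw
    have hnotlt : ¬ (PySem.Chars.find s [' ']).toNat < w.length := by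
      intro hlt
      obtain ⟨u, hu⟩ := (singleton_prefix_iff _ _).mp hpre
      set i : Nat := (PySem.Chars.find s [' ']).toNat with hi
      have hget : s[i]? = some ' ' := by
        have h0 : (List.drop i s)[0]? = s[i + 0]? := List.getElem?_drop
        rw [hu] at h0
        simpa using h0.symm
      have hgetw : s[i]? = some (w[i]'hlt) := by
        rw [hs, List.getElem?_append_left hlt]
        simp
      rw [hgetw] at hget
      exact hw ((Option.some.inj hget) ▸ List.getElem_mem hlt)
    refine ⟨by omega, htake⟩
  · rintro ⟨hf, ht⟩
    have hge : (0 : Int) ≤ PySem.Chars.find s [' '] := by omega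
    obtain ⟨hpre, _⟩ := PySem.Chars.find_spec (s := s) (sub := [' ']) hge
    rw [hf] at hpre
    obtain ⟨u, hu⟩ := (singleton_prefix_iff _ _).mp (by simpa using hpre)
    rw [PySem.Chars.startswith_iff]
    refine ⟨u, ?_⟩
    have := List.take_append_drop w.length s
    rw [ht, hu] at this
    simpa using this

lemma chain_eq (ws : List (List Char)) (s : List Char) (hws : ∀ w ∈ ws, ' ' ∉ w) :
    pvTryPrefixes ws s =
      if PySem.Chars.find s [' '] ≠ -1 ∧ s.take (PySem.Chars.find s [' ']).toNat ∈ ws then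
        s.drop ((PySem.Chars.find s [' ']).toNat + 1)
      else s := by
  induction ws with
  | nil => simp [pvTryPrefixes]
  | cons w ws ih =>
    have hw : ' ' ∉ w := hws w (by simp)
    rw [pvTryPrefixes]
    by_cases h : PySem.Chars.startswith s (w ++ [' ']) = true
    · obtain ⟨hf, ht⟩ := (startswith_word_space w s hw).mp h
      rw [if_pos h, if_pos]
      · rw [PySem.List.slice_from s (by omega)]
        congr 1
        omega
      · refine ⟨by omega, ?_⟩
        have : (PySem.Chars.find s [' ']).toNat = w.length := by omega
        rw [this, ht]
        simp
    · rw [if_neg h, ih (fun v hv => hws v (by simp [hv]))]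
      have hiff : (PySem.Chars.find s [' '] ≠ -1 ∧ List.take (PySem.Chars.find s [' ']).toNat s ∈ w :: ws)
          ↔ (PySem.Chars.find s [' '] ≠ -1 ∧ List.take (PySem.Chars.find s [' ']).toNat s ∈ ws) := by
        constructor
        · rintro ⟨hne, hmem⟩
          rcases List.mem_cons.mp hmem with hmem | hmem
          · exfalso
            have hge : (0 : Int) ≤ PySem.Chars.find s [' '] := by
              have := PySem.Chars.neg_one_le_find s [' ']
              omega
            have hlen : (PySem.Chars.find s [' ']).toNat ≤ s.length := by
              have := PySem.Chars.find_le_length s [' ']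
              omega
            have hwl : w.length = (PySem.Chars.find s [' ']).toNat := by
              rw [← hmem]
              simp [hlen]
            exact h ((startswith_word_space w s hw).mpr ⟨by omega, by rw [hwl]; exact hmem⟩)
          · exact ⟨hne, hmem⟩
        · rintro ⟨hne, hmem⟩
          exact ⟨hne, List.mem_cons.mpr (Or.inr hmem)⟩
      simp only [hiff]

lemma core_eq (s : List Char) :
    pvTryPrefixes pvPrefixesA s =
      (if PySem.Chars.startswith s "out of ".toList then PySem.List.slice s (some 7) none
       else if PySem.Chars.find s [' '] ≠ -1 ∧
           PySem.List.slice s none (some (PySem.Chars.find s [' '])) ∈ pvWordsB then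
         PySem.List.slice s (some (PySem.Chars.find s [' '] + 1)) none
       else s) := by
  have hoo : "out of".toList ++ [' '] = "out of ".toList := by decide
  rw [pvPrefixesA, pvTryPrefixes, hoo]
  by_cases h : PySem.Chars.startswith s "out of ".toList = true
  · rw [if_pos h, if_pos h]
    norm_num [show ("out of".length : Int) = 6 from by decide]
  · rw [if_neg h, if_neg h,
      chain_eq ["at".toList, "from".toList, "to".toList, "of".toList, "in".toList,
        "inside".toList, "near".toList, "beside".toList] s (by decide)]
    by_cases hne : PySem.Chars.find s [' '] = -1
    · simp [hne]
    · have hge : (0 : Int) ≤ PySem.Chars.find s [' '] := by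
        have := PySem.Chars.neg_one_le_find s [' ']
        omega
      have h1 : PySem.List.slice s (some (PySem.Chars.find s [' '] + 1)) none =
          List.drop ((PySem.Chars.find s [' ']).toNat + 1) s := by
        rw [PySem.List.slice_from s (by omega)]
        congr 1
        omega
      rw [h1, PySem.List.slice_to s hge, pvWordsB]

-- ---- lowercase words vs title-cased words ----

lemma mem_words_iff (w : List Char) (hlow : List.map PySem.Chars.lowerChar w = w) :
    w ∈ pvWordsB ↔ pvTitle false w ∈ pvTitleWords := by
  constructor
  · intro h
    simp only [pvWordsB, List.mem_cons, List.not_mem_nil, or_false] at h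
    rcases h with h|h|h|h|h|h|h|h <;> rw [h] <;> decide
  · intro h
    have hl := lower_pvTitle false w
    rw [hlow] at hl
    simp only [pvTitleWords, List.mem_cons, List.not_mem_nil, or_false] at h
    rcases h with h|h|h|h|h|h|h|h <;>
      · rw [h] at hl
        rw [← hl]
        decide

-- ---- the main equivalence ----

-- ===== VERDICT (by name: the statement is the Claim_ definition above) =====
theorem clean_clinic_name_spec : Claim_equal_clean_clinic_name := by
  intro name _
  simp only [Spec_clean_clinic_name, clean_clinic_name, clean_clinic_name_alt, core_eq]
  generalize hu : PySem.Chars.strip name.toList = u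
  have hstu : PySem.Chars.strip u = u := by rw [← hu, strip_strip]
  set s : List Char := PySem.Chars.lower u with hs
  have hsmap : s = List.map PySem.Chars.lowerChar u := rfl
  have hli : List.map PySem.Chars.lowerChar s = s := by
    rw [hsmap, List.map_map]
    congr 1
    funext c
    simp [Function.comp, lowerChar_lowerChar]
  have hstrip_s : PySem.Chars.strip s = s := by
    rw [hsmap, stripped_lower, hstu]
  have hrstrip_s := (strip_parts s hstrip_s).2
  have htb : pvTitle false u = pvTitle false s := by
    rw [hsmap, pvTitle_lower]
  rw [htb]
  set t : List Char := pvTitle false s with hts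
  have hlt : List.map PySem.Chars.lowerChar t = s := by
    rw [hts, lower_pvTitle, hli]
  have hfind : PySem.Chars.find t [' '] = PySem.Chars.find s [' '] := by
    conv_rhs => rw [← hlt]
    rw [find_space_lower]
  have hOO : pvTitle false ("out of ".toList) = "Out Of ".toList := by decide
  have hfold : ("out of ".toList).foldl (fun _ c => PySem.Chars.isalpha c) false = false := by decide
  have hout : PySem.Chars.startswith s "out of ".toList = true ↔
      PySem.Chars.startswith t "Out Of ".toList = true := by
    rw [PySem.Chars.startswith_iff, PySem.Chars.startswith_iff]
    constructor
    · rintro ⟨r, hr⟩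
      exact ⟨pvTitle false r, by rw [hts, ← hr, pvTitle_append, hfold, hOO]⟩
    · rintro ⟨r, hr⟩
      refine ⟨List.map PySem.Chars.lowerChar r, ?_⟩
      have h2 := congrArg (List.map PySem.Chars.lowerChar) hr
      rw [List.map_append, hlt] at h2
      rw [← h2]
      congr 1
  by_cases h1 : PySem.Chars.startswith s "out of ".toList = true
  · rw [if_pos h1, if_pos (hout.mp h1)]
    obtain ⟨r, hr⟩ := (PySem.Chars.startswith_iff _ _).mp h1
    have hdrops : PySem.List.slice s (some 7) none = List.drop 7 s := by
      rw [PySem.List.slice_from s (by omega)]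
      congr 1
    have hdropt : PySem.List.slice t (some 7) none = List.drop 7 t := by
      rw [PySem.List.slice_from t (by omega)]
      congr 1
    have hds : List.drop 7 s = r := by
      rw [← hr, List.drop_left' (by decide : ("out of ".toList).length = 7)]
    have hdt : List.drop 7 t = pvTitle false r := by
      rw [hts, ← hr, pvTitle_append, hfold, hOO,
        List.drop_left' (by decide : ("Out Of ".toList).length = 7)]
    rw [hdrops, strip_drop s hrstrip_s 7, hds, pvTitle_lstrip, hdropt, hdt]
  · rw [if_neg h1, if_neg (fun hb => h1 (hout.mpr hb))]
    by_cases h2 : PySem.Chars.find s [' '] = -1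
    · have h2t : PySem.Chars.find t [' '] = -1 := by rw [hfind, h2]
      rw [if_neg (fun hc => hc.1 h2), if_neg (fun hc => hc.1 h2t), hstrip_s, ← hts]
    · have hge : (0:Int) ≤ PySem.Chars.find s [' '] := by
        have := PySem.Chars.neg_one_le_find s [' ']
        omega
      obtain ⟨hpre, _⟩ := PySem.Chars.find_spec (s := s) (sub := [' ']) hge
      obtain ⟨s₂, hs2⟩ := (singleton_prefix_iff _ _).mp hpre
      set n : Nat := (PySem.Chars.find s [' ']).toNat with hn
      set s₁ : List Char := List.take n s with hs1
      have hsplit : s = s₁ ++ ' ' :: s₂ := by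
        rw [hs1, ← hs2]
        exact (List.take_append_drop n s).symm
      have hlen1 : s₁.length = n := by
        rw [hs1, List.length_take]
        have := PySem.Chars.find_le_length s [' ']
        omega
      have htdec : t = pvTitle false s₁ ++ ' ' :: pvTitle false s₂ := by
        rw [hts]
        conv_lhs => rw [hsplit]
        rw [pvTitle_append, pvTitle_cons, if_neg (by decide)]
      have hlen1t : (pvTitle false s₁).length = n := by rw [length_pvTitle, hlen1]
      have hslice_s : PySem.List.slice s none (some (PySem.Chars.find s [' '])) = s₁ := by
        rw [PySem.List.slice_to s hge, ← hn, hs1]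
      have hslice_t : PySem.List.slice t none (some (PySem.Chars.find t [' '])) = pvTitle false s₁ := by
        rw [hfind, PySem.List.slice_to t hge, ← hn, htdec, List.take_left' hlen1t]
      have hmem : (s₁ ∈ pvWordsB) ↔ (pvTitle false s₁ ∈ pvTitleWords) :=
        mem_words_iff s₁ (by rw [hs1, List.map_take, hli])
      have h2t : ¬ PySem.Chars.find t [' '] = -1 := by rw [hfind]; exact h2
      by_cases h3 : s₁ ∈ pvWordsB
      · rw [if_pos (⟨h2, by rw [hslice_s]; exact h3⟩ :
            PySem.Chars.find s [' '] ≠ -1 ∧ PySem.List.slice s none (some (PySem.Chars.find s [' '])) ∈ pvWordsB),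
          if_pos (⟨h2t, ?_⟩ : PySem.Chars.find t [' '] ≠ -1 ∧
            (if PySem.Chars.find t [' '] = -1 then t else PySem.List.slice t none (some (PySem.Chars.find t [' ']))) ∈ pvTitleWords),
          if_neg h2t]
        · have hsliceA : PySem.List.slice s (some (PySem.Chars.find s [' '] + 1)) none = List.drop (n+1) s := by
            rw [PySem.List.slice_from s (by omega)]
            congr 1
            omega
          have hsliceB : PySem.List.slice t (some (PySem.Chars.find t [' '] + 1)) none = List.drop (n+1) t := by
            rw [hfind, PySem.List.slice_from t (by omega)]
            congr 1
            omega
          have hdropA : List.drop (n+1) s = s₂ := by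
            rw [hsplit, show s₁ ++ ' ' :: s₂ = (s₁ ++ [' ']) ++ s₂ by simp,
              List.drop_left' (by simp [hlen1])]
          have hdropB : List.drop (n+1) t = pvTitle false s₂ := by
            rw [htdec, show pvTitle false s₁ ++ ' ' :: pvTitle false s₂ = (pvTitle false s₁ ++ [' ']) ++ pvTitle false s₂ by simp,
              List.drop_left' (by simp [hlen1t])]
          rw [hsliceA, strip_drop s hrstrip_s (n+1), hdropA, pvTitle_lstrip, hsliceB, hdropB]
        · rw [if_neg h2t, hslice_t]
          exact hmem.mp h3
      · rw [if_neg (fun hc => h3 (by rw [hslice_s] at hc; exact hc.2)),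
          if_neg (fun hc => h3 (hmem.mpr (by have := hc.2; rw [if_neg h2t, hslice_t] at this; exact this))),
          hstrip_s, ← hts]
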